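-- pv_equiv track=rewrite | github.com/mercutioviz/kast | kast/plugins/katana_plugin.py | _group_urls_by_extension
-- ===== SOURCE A (Python) =====
-- def _group_urls_by_extension(urls):
--     """
--     Group URLs by their file extension.
--     Returns a dictionary where keys are extension names and values are lists of URLs.
--     """
--     groups = {}
--
--     for url in urls:
--         # Determine the extension/category
--         if '.' in url.split('?')[0].split('/')[-1]:
--             # Has an extension
--             ext = '.' + url.split('?')[0].split('.')[-1].lower()
--             # Limit extension length to avoid weird cases
--             if len(ext) > 10:
--                 ext = "Other"
--         else:
--             # No extension - likely a directory or endpoint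
--             ext = "Endpoints"
--
--         if ext not in groups:
--             groups[ext] = []
--         groups[ext].append(url)
--
--     return groups
-- ===== SOURCE B (Python) =====
-- def _ext_key(url):
--     # Map one URL to its group key (same rules as the original grouping).
--     base = url.split('?')[0]
--     if '.' in base.split('/')[-1]:
--         ext = '.' + base.split('.')[-1].lower()
--         return ext if len(ext) <= 10 else "Other"
--     return "Endpoints"
--
--
-- def _group_urls_by_extension(urls):
--     # Key every URL once, then build the dict per distinct key (first-occurrence
--     # order) by filtering the keyed list, instead of growing the dict URL by URL.
--     keyed = [(_ext_key(u), u) for u in urls]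
--     return {k: [u for kk, u in keyed if kk == k]
--             for k in dict.fromkeys(kk for kk, _ in keyed)}
-- ===== Notes on version B (the rewrite author's own statement) =====
-- stated objective: alternative
-- what changed: A grows a dict incrementally inside one loop (setdefault-then-append per URL); B first maps every URL to its key once, then builds the dict in one comprehension: for each distinct key in first-occurrence order it filters the keyed list.
import Mathlib
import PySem

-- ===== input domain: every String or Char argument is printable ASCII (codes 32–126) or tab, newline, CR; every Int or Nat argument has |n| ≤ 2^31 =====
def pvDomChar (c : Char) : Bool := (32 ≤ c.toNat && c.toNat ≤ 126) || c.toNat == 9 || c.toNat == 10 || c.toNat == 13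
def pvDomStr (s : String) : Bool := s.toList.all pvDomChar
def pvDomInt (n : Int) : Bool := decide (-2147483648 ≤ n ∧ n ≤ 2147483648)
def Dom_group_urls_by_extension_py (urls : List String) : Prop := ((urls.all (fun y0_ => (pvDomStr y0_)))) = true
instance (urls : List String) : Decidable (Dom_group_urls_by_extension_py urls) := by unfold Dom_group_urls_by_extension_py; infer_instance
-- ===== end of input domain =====

-- B keys every URL once, then builds the dict per distinct key by filtering the keyed
-- list (a comprehension), instead of A's incremental setdefault-then-append loop.


-- ===== PORT A =====
-- str.split with a non-empty separator never returns [], so Python's [0] / [-1] never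
-- raise here; pyGetD with default "" is exact on these lists.
def group_urls_by_extension_py (urls : List String) : List (String × List String) :=
  (urls.foldl (fun groups url =>
    let ext :=
      if PySem.Str.isIn "." (PySem.List.pyGetD
            ((PySem.Str.split? (PySem.List.pyGetD ((PySem.Str.split? url "?").getD []) 0 "") "/").getD []) (-1) "") then
        let e := "." ++ PySem.Str.lower (PySem.List.pyGetD
            ((PySem.Str.split? (PySem.List.pyGetD ((PySem.Str.split? url "?").getD []) 0 "") ".").getD []) (-1) "")
        if 10 < PySem.Str.len e then "Other" else e
      else "Endpoints"
    let groups := if groups.contains ext then groups else groups.insert ext ([] : List String)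
    groups.modify ext [] (fun l => l ++ [url])) PySem.Dict.empty).items

-- ===== PORT B =====
def pvExtKey (url : String) : String :=
  let base := PySem.List.pyGetD ((PySem.Str.split? url "?").getD []) 0 ""
  if PySem.Str.isIn "." (PySem.List.pyGetD ((PySem.Str.split? base "/").getD []) (-1) "") then
    let ext := "." ++ PySem.Str.lower (PySem.List.pyGetD ((PySem.Str.split? base ".").getD []) (-1) "")
    if PySem.Str.len ext ≤ 10 then ext else "Other"
  else "Endpoints"

def group_urls_by_extension_py_alt (urls : List String) : List (String × List String) :=
  let keyed := urls.map (fun u => (pvExtKey u, u))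
  (PySem.List.dedup (keyed.map (·.1))).map
    (fun k => (k, (keyed.filter (fun p => p.1 == k)).map (·.2)))

-- ===== PRECONDITION & SPEC =====
def Spec_group_urls_by_extension_py (urls : List String) (out : List (String × List String)) : Prop := out = group_urls_by_extension_py_alt urls
instance (urls : List String) (out : List (String × List String)) : Decidable (Spec_group_urls_by_extension_py urls out) := by unfold Spec_group_urls_by_extension_py; infer_instance

-- ===== CLAIM (what is proved, stated in full; the proofs are below) =====
def Claim_equal_group_urls_by_extension_py : Prop := ∀ (urls : List String), Dom_group_urls_by_extension_py urls → Spec_group_urls_by_extension_py urls (group_urls_by_extension_py urls)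

-- ===== LEMMAS AND PROOFS =====

-- A's inline key computation equals B's helper (the branches are written the other way round).
lemma extKey_eq (url : String) :
    (if PySem.Str.isIn "." (PySem.List.pyGetD
          ((PySem.Str.split? (PySem.List.pyGetD ((PySem.Str.split? url "?").getD []) 0 "") "/").getD []) (-1) "") then
        let e := "." ++ PySem.Str.lower (PySem.List.pyGetD
            ((PySem.Str.split? (PySem.List.pyGetD ((PySem.Str.split? url "?").getD []) 0 "") ".").getD []) (-1) "")
        if 10 < PySem.Str.len e then "Other" else e
      else "Endpoints") = pvExtKey url := by
  unfold pvExtKey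
  dsimp only
  split_ifs <;> first | rfl | omega

-- setdefault-then-modify collapses to a single modify with the same default.
lemma insert_empty_modify {κ ν : Type} [BEq κ] [LawfulBEq κ] (d : PySem.Dict κ ν)
    (k : κ) (v0 : ν) (f : ν → ν) (h : d.contains k = false) :
    (d.insert k v0).modify k v0 f = d.modify k v0 f := by
  simp [PySem.Dict.modify, PySem.Dict.getD_insert_self, PySem.Dict.insert_insert_self,
    PySem.Dict.getD_of_not_contains d h (d0 := v0)]

-- A's loop body is a single modify keyed by pvExtKey.
lemma step_eq :
    (fun (groups : PySem.Dict String (List String)) (url : String) =>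
      let ext :=
        if PySem.Str.isIn "." (PySem.List.pyGetD
              ((PySem.Str.split? (PySem.List.pyGetD ((PySem.Str.split? url "?").getD []) 0 "") "/").getD []) (-1) "") then
          let e := "." ++ PySem.Str.lower (PySem.List.pyGetD
              ((PySem.Str.split? (PySem.List.pyGetD ((PySem.Str.split? url "?").getD []) 0 "") ".").getD []) (-1) "")
          if 10 < PySem.Str.len e then "Other" else e
        else "Endpoints"
      let groups := if groups.contains ext then groups else groups.insert ext ([] : List String)
      groups.modify ext [] (fun l => l ++ [url]))
    = fun groups url => groups.modify (pvExtKey url) [] (fun l => l ++ [url]) := by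
  funext d url
  dsimp only
  rw [extKey_eq]
  by_cases h : d.contains (pvExtKey url) = true
  · rw [if_pos h]
  · rw [if_neg h, insert_empty_modify d _ _ _ (by simpa using h)]

-- ===== VERDICT (by name: the statement is the Claim_ definition above) =====
theorem group_urls_by_extension_py_spec : Claim_equal_group_urls_by_extension_py := by
  intro urls _
  unfold Spec_group_urls_by_extension_py group_urls_by_extension_py group_urls_by_extension_py_alt
  rw [step_eq]
  have hmap := List.foldl_map (f := fun u : String => (pvExtKey u, u))
      (g := fun (d : PySem.Dict String (List String)) (p : String × String) =>
        d.modify p.1 [] (fun l => l ++ [p.2])) (l := urls) (init := PySem.Dict.empty)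
  rw [← hmap]
  rw [PySem.Dict.items_eq_map_keys _
    (PySem.Dict.nodup_keys_foldl_modify_key _ Prod.fst _ _ _ PySem.Dict.nodup_keys_empty) []]
  rw [PySem.Dict.keys_foldl_modify_key]
  simp only [PySem.Dict.getD_foldl_modify_append, PySem.Dict.getD_empty, PySem.Dict.keys_empty,
    List.nil_append, PySem.List.dedup_eq_ofList]
  rfl
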